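-- pv_equiv track=rewrite | github.com/aarhusstadsarkiv/backup | src/backup/id_field_list_ops.py | less_than
-- ===== SOURCE A (Python) =====
-- def less_than(fieldvalues: list, value: str) -> bool:
--     if fieldvalues == []:
--         return False
--     else:
--         for x in range(0, len(fieldvalues), 1):
--             entry_content_int = fieldvalues[x].split(";")[0]
--             if value > entry_content_int:
--                 return True
--
--         return False
-- ===== SOURCE B (Python) =====
-- def less_than(fieldvalues: list, value: str) -> bool:
--     if not fieldvalues:
--         return False
--     return value > min(v.split(";")[0] for v in fieldvalues)
-- ===== Notes on version B (the rewrite author's own statement) =====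
-- stated objective: simpler
-- what changed: Replaces the index-loop early-exit search with an aggregate-then-compare: reduce the list to its minimum prefix with min() and make a single comparison, using that 'any prefix < value' iff 'min prefix < value'.
import Mathlib
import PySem

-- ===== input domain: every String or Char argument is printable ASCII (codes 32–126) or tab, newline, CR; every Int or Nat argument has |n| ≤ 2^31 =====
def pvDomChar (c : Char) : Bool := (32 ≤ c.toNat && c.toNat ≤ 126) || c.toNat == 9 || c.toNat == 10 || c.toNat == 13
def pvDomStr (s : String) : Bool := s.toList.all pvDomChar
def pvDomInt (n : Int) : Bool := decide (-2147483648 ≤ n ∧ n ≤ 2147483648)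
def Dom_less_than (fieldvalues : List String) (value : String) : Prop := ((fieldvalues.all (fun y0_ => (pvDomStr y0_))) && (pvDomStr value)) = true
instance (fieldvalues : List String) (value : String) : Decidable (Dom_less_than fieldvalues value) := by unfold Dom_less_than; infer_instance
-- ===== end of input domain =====

-- B replaces A's early-exit index-loop search by a min-reduction of the prefixes followed by a single comparison (simpler decomposition).


-- ===== PORT A =====
-- prefix before the first ';' : v.split(";")[0]  (split? ";" is always some, and the result list is nonempty)
def pvPrefix (v : String) : String := ((PySem.Str.split? v ";").getD []).getD 0 ""

-- the 'for x in range(0, len(fieldvalues), 1): … return True' loop, with early exit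
def less_than_go (fieldvalues : List String) (value : String) : List Int → Bool
  | [] => false
  | x :: rest =>
    let entry_content_int := pvPrefix (PySem.List.pyGetD fieldvalues x "")
    if entry_content_int < value then true
    else less_than_go fieldvalues value rest

def less_than (fieldvalues : List String) (value : String) : Bool :=
  if fieldvalues = [] then false
  else less_than_go fieldvalues value (PySem.List.pyRange 0 (PySem.List.len fieldvalues) 1)

-- ===== PORT B =====
def less_than_alt (fieldvalues : List String) (value : String) : Bool :=
  if fieldvalues = [] then false
  else
    match PySem.List.min? (fieldvalues.map pvPrefix) (fun x => x) with
    | none => false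
    | some m => decide (m < value)

-- ===== PRECONDITION & SPEC =====
def Spec_less_than (fieldvalues : List String) (value : String) (out : Bool) : Prop := out = less_than_alt fieldvalues value
instance (fieldvalues : List String) (value : String) (out : Bool) : Decidable (Spec_less_than fieldvalues value out) := by unfold Spec_less_than; infer_instance

-- ===== CLAIM (what is proved, stated in full; the proofs are below) =====
def Claim_equal_less_than : Prop := ∀ (fieldvalues : List String) (value : String), Dom_less_than fieldvalues value → Spec_less_than fieldvalues value (less_than fieldvalues value)

-- ===== LEMMAS AND PROOFS =====

-- A's loop starting at index a is an 'any' over the dropped suffix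
theorem less_than_go_eq (fieldvalues : List String) (value : String) :
    ∀ (n : Nat) (a : Int), 0 ≤ a → fieldvalues.length - a.toNat = n →
    less_than_go fieldvalues value (PySem.List.pyRange a (PySem.List.len fieldvalues) 1)
      = (fieldvalues.drop a.toNat).any (fun s => decide (pvPrefix s < value)) := by
  intro n
  induction n with
  | zero =>
    intro a ha hn
    have hlen : (fieldvalues.length : Int) ≤ a := by omega
    rw [PySem.List.pyRange_one_eq_nil (by simpa [PySem.List.len] using hlen)]
    have : fieldvalues.length ≤ a.toNat := by omega
    simp [less_than_go, List.drop_eq_nil_of_le this]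
  | succ n ih =>
    intro a ha hn
    have hlt : a < (fieldvalues.length : Int) := by omega
    rw [PySem.List.pyRange_one_cons (by simpa [PySem.List.len] using hlt)]
    have hnat : a.toNat < fieldvalues.length := by omega
    have hget : PySem.List.pyGetD fieldvalues a "" = fieldvalues[a.toNat] := by
      exact PySem.List.pyGetD_eq_getElem fieldvalues "" ha (by exact_mod_cast hlt)
    have hdrop : fieldvalues.drop a.toNat = fieldvalues[a.toNat] :: fieldvalues.drop (a.toNat + 1) := by
      exact List.drop_eq_getElem_cons hnat
    rw [less_than_go, hdrop, List.any_cons]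
    have ha1 : ((a + 1 : Int)).toNat = a.toNat + 1 := by omega
    rw [hget]
    by_cases h : pvPrefix fieldvalues[a.toNat] < value
    · rw [if_pos h, decide_eq_true h, Bool.true_or]
    · rw [if_neg h, decide_eq_false h, Bool.false_or, ih (a + 1) (by omega) (by omega), ha1]

theorem less_than_spec : Claim_equal_less_than := by
  intro fieldvalues value _
  unfold Spec_less_than less_than less_than_alt
  by_cases hfv : fieldvalues = []
  · simp [hfv]
  · simp only [if_neg hfv]
    rw [less_than_go_eq fieldvalues value fieldvalues.length 0 le_rfl (by simp)]
    simp only [Int.toNat_zero, List.drop_zero]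
    have hne : fieldvalues.map pvPrefix ≠ [] := by simpa using hfv
    obtain ⟨m, hm⟩ : ∃ m, PySem.List.min? (fieldvalues.map pvPrefix) (fun x => x) = some m := by
      cases h : PySem.List.min? (fieldvalues.map pvPrefix) (fun x => x) with
      | none => exact absurd ((PySem.List.min?_eq_none_iff _ _).mp h) hne
      | some m => exact ⟨m, rfl⟩
    rw [hm]
    show (fieldvalues.any fun s => decide (pvPrefix s < value)) = decide (m < value)
    have hmem : m ∈ fieldvalues.map pvPrefix := PySem.List.min?_mem hm
    have hmin : ∀ y ∈ fieldvalues.map pvPrefix, m ≤ y := by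
      intro y hy; exact PySem.List.min?_isMin hm y hy
    by_cases h : m < value
    · obtain ⟨s, hs, hps⟩ := List.mem_map.mp hmem
      rw [decide_eq_true h]
      rw [List.any_eq_true]
      refine ⟨s, hs, ?_⟩
      have hsv : pvPrefix s < value := by rw [hps]; exact h
      exact decide_eq_true hsv
    · rw [decide_eq_false h]
      rw [List.any_eq_false]
      intro s hs
      have hle := hmin (pvPrefix s) (List.mem_map.mpr ⟨s, hs, rfl⟩)
      simp only [decide_eq_true_eq]
      intro hlt
      exact h (lt_of_le_of_lt hle hlt)
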